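-- pv_equiv track=rewrite | github.com/aeronjl/transcribe | src/precisetranscribe/__init__.py | remove_excessive_repetitions
-- ===== SOURCE A (Python) =====
-- def remove_excessive_repetitions(text, max_repetitions=3):
--     words = text.split()
--     result = []
--     repeat_count = 0
--     last_word = None
--     for word in words:
--         if word == last_word:
--             repeat_count += 1
--             if repeat_count <= max_repetitions:
--                 result.append(word)
--         else:
--             repeat_count = 1
--             result.append(word)
--         last_word = word
--     return ' '.join(result)
-- ===== SOURCE B (Python) =====
-- def remove_excessive_repetitions(text, max_repetitions=3):
--     words = text.split()
--     result = []
--     i = 0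
--     n = len(words)
--     while i < n:
--         j = i
--         while j < n and words[j] == words[i]:
--             j += 1
--         result.extend([words[i]] * max(1, min(j - i, max_repetitions)))
--         i = j
--     return ' '.join(result)
-- ===== Notes on version B (the rewrite author's own statement) =====
-- stated objective: alternative
-- what changed: Replaces A's per-word stateful loop (last_word sentinel + running repeat_count) with a run-length scan: an index pass finds each maximal run of equal words and emits the word max(1, min(run_length, max_repetitions)) times at once.
import Mathlib
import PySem

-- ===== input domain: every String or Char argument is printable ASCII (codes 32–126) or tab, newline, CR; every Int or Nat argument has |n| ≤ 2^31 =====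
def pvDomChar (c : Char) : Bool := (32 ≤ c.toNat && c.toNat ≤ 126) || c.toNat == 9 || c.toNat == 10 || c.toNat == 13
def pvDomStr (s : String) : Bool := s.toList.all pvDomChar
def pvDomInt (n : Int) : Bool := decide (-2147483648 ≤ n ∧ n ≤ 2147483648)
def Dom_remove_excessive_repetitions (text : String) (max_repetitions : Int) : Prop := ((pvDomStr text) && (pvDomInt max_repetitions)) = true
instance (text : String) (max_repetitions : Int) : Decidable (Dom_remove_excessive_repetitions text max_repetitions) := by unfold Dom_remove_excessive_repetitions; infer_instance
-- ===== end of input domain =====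

-- B replaces A's stateful per-word loop (last_word sentinel + running repeat count) with a
-- run-length scan emitting each maximal run at once; objective: alternative (same cost).

-- ===== PORT A =====
-- A's loop body: state = (result, repeat_count, last_word)
def pvStepA (max_repetitions : Int) (st : List String × Int × Option String) (word : String) :
    List String × Int × Option String :=
  if some word = st.2.2 then
    (if st.2.1 + 1 ≤ max_repetitions then st.1 ++ [word] else st.1, st.2.1 + 1, some word)
  else
    (st.1 ++ [word], 1, some word)

def remove_excessive_repetitions (text : String) (max_repetitions : Int) : String :=
  PySem.Str.join " " ((PySem.Str.split₀ text).foldl (pvStepA max_repetitions) ([], 0, none)).1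

-- ===== PORT B =====
-- B's inner while loop: split off the maximal leading run equal to w (its length, the rest)
def pvRunSplit (w : String) : List String → Nat × List String
  | [] => (0, [])
  | x :: xs =>
      if x = w then
        let p := pvRunSplit w xs
        (p.1 + 1, p.2)
      else (0, x :: xs)

-- termination measure for B's outer loop (the port itself needs it)
theorem pvRunSplit_length (w : String) (ws : List String) :
    (pvRunSplit w ws).2.length ≤ ws.length := by
  induction ws with
  | nil => simp [pvRunSplit]
  | cons x xs ih =>
      simp only [pvRunSplit]
      split_ifs <;> simp
      omega

-- B's outer while loop over the remaining words
def pvBLoop (max_repetitions : Int) (acc : List String) : List String → List String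
  | [] => acc
  | w :: ws =>
      let p := pvRunSplit w ws
      pvBLoop max_repetitions
        (acc ++ List.replicate (max 1 (min ((p.1 : Int) + 1) max_repetitions)).toNat w) p.2
  termination_by ws => ws.length
  decreasing_by simpa using Nat.lt_succ_of_le (pvRunSplit_length w ws)

def remove_excessive_repetitions_alt (text : String) (max_repetitions : Int) : String :=
  PySem.Str.join " " (pvBLoop max_repetitions [] (PySem.Str.split₀ text))

-- ===== PRECONDITION & SPEC =====
def Spec_remove_excessive_repetitions (text : String) (max_repetitions : Int) (out : String) : Prop := out = remove_excessive_repetitions_alt text max_repetitions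
instance (text : String) (max_repetitions : Int) (out : String) : Decidable (Spec_remove_excessive_repetitions text max_repetitions out) := by unfold Spec_remove_excessive_repetitions; infer_instance

-- ===== CLAIM (what is proved, stated in full; the proofs are below) =====
def Claim_equal_remove_excessive_repetitions : Prop := ∀ (text : String) (max_repetitions : Int), Dom_remove_excessive_repetitions text max_repetitions → Spec_remove_excessive_repetitions text max_repetitions (remove_excessive_repetitions text max_repetitions)

-- ===== LEMMAS AND PROOFS =====

theorem pv_append_rep (acc : List String) (x : String) (n : ℕ) :
    (acc ++ [x]) ++ List.replicate n x = acc ++ List.replicate (n + 1) x := by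
  simp [List.replicate_succ]

-- invariant: from a mid-run state (acc, rc, some w), A's fold produces what B's loop
-- produces from the run-split of the remaining words
theorem pv_aux (mr : Int) (ws : List String) : ∀ (w : String) (rc : Int) (acc : List String),
    1 ≤ rc →
    (ws.foldl (pvStepA mr) (acc, rc, some w)).1 =
      pvBLoop mr
        (acc ++ List.replicate (min (rc + ((pvRunSplit w ws).1 : Int)) (max rc mr) - rc).toNat w)
        (pvRunSplit w ws).2 := by
  induction ws with
  | nil =>
      intro w rc acc _
      simp only [List.foldl_nil, pvRunSplit, pvBLoop]
      rw [show (min (rc + ((0:ℕ) : Int)) (max rc mr) - rc).toNat = 0 by omega]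
      simp
  | cons x xs ih =>
      intro w rc acc hrc
      by_cases hx : x = w
      · subst hx
        simp only [List.foldl_cons, pvStepA, pvRunSplit, reduceIte]
        by_cases hle : rc + 1 ≤ mr
        · rw [if_pos hle]
          rw [ih x (rc + 1) (acc ++ [x]) (by omega)]
          rw [pv_append_rep]
          have h : ∀ k : ℕ, (min (rc + 1 + (k : Int)) (max (rc + 1) mr) - (rc + 1)).toNat + 1
              = (min (rc + ((k + 1 : ℕ) : Int)) (max rc mr) - rc).toNat := by
            intro k; omega
          rw [h]
        · rw [if_neg hle]
          rw [ih x (rc + 1) acc (by omega)]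
          have h : ∀ k : ℕ, (min (rc + 1 + (k : Int)) (max (rc + 1) mr) - (rc + 1)).toNat
              = (min (rc + ((k + 1 : ℕ) : Int)) (max rc mr) - rc).toNat := by
            intro k; omega
          rw [h]
      · have hx' : ¬ (some x = some w) := by simpa using hx
        simp only [List.foldl_cons, pvStepA, if_neg hx', pvRunSplit, if_neg hx]
        rw [ih x 1 (acc ++ [x]) le_rfl]
        have hz : (min (rc + ((0:ℕ) : Int)) (max rc mr) - rc).toNat = 0 := by omega
        rw [hz]
        simp only [List.replicate_zero, List.append_nil]
        conv_rhs => rw [pvBLoop]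
        rw [pv_append_rep]
        have h : ∀ k : ℕ, (min (1 + (k : Int)) (max 1 mr) - 1).toNat + 1
            = (max 1 (min ((k : Int) + 1) mr)).toNat := by
          intro k; omega
        rw [h]

theorem pv_main (mr : Int) (ws : List String) :
    (ws.foldl (pvStepA mr) ([], 0, none)).1 = pvBLoop mr [] ws := by
  cases ws with
  | nil => simp [pvBLoop]
  | cons w ws =>
      simp only [List.foldl_cons, pvStepA, reduceCtorEq, reduceIte, List.nil_append]
      rw [pv_aux mr ws w 1 [w] le_rfl]
      conv_rhs => rw [pvBLoop]
      rw [show ([w] : List String) = [] ++ [w] by simp, pv_append_rep]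
      have h : ∀ k : ℕ, (min (1 + (k : Int)) (max 1 mr) - 1).toNat + 1
          = (max 1 (min ((k : Int) + 1) mr)).toNat := by
        intro k; omega
      rw [h]

-- ===== VERDICT (by name: the statement is the Claim_ definition above) =====
theorem remove_excessive_repetitions_spec : Claim_equal_remove_excessive_repetitions := by
  intro text mr _
  show _ = _
  unfold remove_excessive_repetitions remove_excessive_repetitions_alt
  rw [pv_main]
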